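-- pv_equiv track=rewrite | github.com/DillonKoch/Sports_Betting | Modeling/run_models.py | _game_lists
-- ===== SOURCE A (Python) =====
-- def _game_lists(pred_lists):  # Specific Helper update_pred_df
--     """
--     making lists of game info - date, home, away, bet_val, ..
--     """
--     game_lists = []
--     for pred_list in pred_lists:
--         added = False
--         for game_list in game_lists:
--             date_match = pred_list[0] == game_list[0][0]
--             home_match = pred_list[1] == game_list[0][1]
--             away_match = pred_list[2] == game_list[0][2]
--             if date_match and home_match and away_match and (not added):
--                 game_list.append(pred_list)
--                 added = True
--         if not added:
--             game_lists.append([pred_list])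
--     return game_lists
-- ===== SOURCE B (Python) =====
-- def _game_lists(pred_lists):  # Specific Helper update_pred_df
--     """
--     making lists of game info - date, home, away, bet_val, ..
--     """
--     keys = []
--     for row in pred_lists:
--         k = (row[0], row[1], row[2])
--         if k not in keys:
--             keys.append(k)
--     return [[row for row in pred_lists if (row[0], row[1], row[2]) == k] for k in keys]
-- ===== Notes on version B (the rewrite author's own statement) =====
-- stated objective: alternative
-- what changed: two staged passes instead of A's single pass mutating partial groups with an 'added' flag: first collect the distinct (date, home, away) keys in first-seen order, then build each group wholesale by filtering the whole input per key
-- outside the precondition, e.g. on _game_lists([['a']]): A returns [[['a']]], B raises IndexError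
import Mathlib
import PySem

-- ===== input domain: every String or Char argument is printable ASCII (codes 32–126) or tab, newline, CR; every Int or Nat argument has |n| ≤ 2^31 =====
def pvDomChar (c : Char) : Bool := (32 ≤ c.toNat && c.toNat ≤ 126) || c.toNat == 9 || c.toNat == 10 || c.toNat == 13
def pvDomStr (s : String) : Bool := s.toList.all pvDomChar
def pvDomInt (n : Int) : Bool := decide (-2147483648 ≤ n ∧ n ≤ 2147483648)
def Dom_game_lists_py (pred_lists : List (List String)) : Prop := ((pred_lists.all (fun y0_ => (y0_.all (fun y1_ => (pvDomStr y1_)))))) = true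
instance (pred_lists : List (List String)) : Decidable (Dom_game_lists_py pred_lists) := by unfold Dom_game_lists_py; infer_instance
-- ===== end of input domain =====

-- B restructures A's single mutating pass (scan all partial groups per row, 'added' flag) into two
-- staged passes: collect the distinct (date, home, away) keys in first-seen order, then build each
-- group by filtering the whole input per key; same asymptotic cost, different decomposition.

-- ===== PORT A =====
-- inner loop body: compare pred_list's (date, home, away) with the group's first row, append at most once
def gameMatchStep (pred_list : List String) (st : List (List (List String)) × Bool)
    (game_list : List (List String)) : List (List (List String)) × Bool :=
  let head := (PySem.List.pyGet? game_list 0).getD []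
  let date_match := PySem.List.pyGet? pred_list 0 == PySem.List.pyGet? head 0
  let home_match := PySem.List.pyGet? pred_list 1 == PySem.List.pyGet? head 1
  let away_match := PySem.List.pyGet? pred_list 2 == PySem.List.pyGet? head 2
  if date_match && home_match && away_match && !st.2 then
    (st.1 ++ [game_list ++ [pred_list]], true)
  else
    (st.1 ++ [game_list], st.2)

-- outer loop body: scan all of game_lists; if no group matched, start a new group
def gameOuterStep (game_lists : List (List (List String))) (pred_list : List String) :
    List (List (List String)) :=
  let r := game_lists.foldl (gameMatchStep pred_list) ([], false)
  if !r.2 then r.1 ++ [[pred_list]] else r.1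

def game_lists_py (pred_lists : List (List String)) : List (List (List String)) :=
  pred_lists.foldl gameOuterStep []

-- ===== PORT B =====
-- the tuple (row[0], row[1], row[2])
def gameKey (row : List String) : Option String × Option String × Option String :=
  (PySem.List.pyGet? row 0, PySem.List.pyGet? row 1, PySem.List.pyGet? row 2)

-- first pass's loop body: 'if k not in keys: keys.append(k)'
def gameKeysStep (ks : List (Option String × Option String × Option String)) (row : List String) :
    List (Option String × Option String × Option String) :=
  if gameKey row ∈ ks then ks else ks ++ [gameKey row]

def game_lists_py_alt (pred_lists : List (List String)) : List (List (List String)) :=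
  let keys := pred_lists.foldl gameKeysStep []
  keys.map (fun k => pred_lists.filter (fun row => gameKey row == k))

-- ===== PRECONDITION & SPEC =====
-- Pre_ excludes inputs with a row shorter than 3: there Python A raises IndexError, except for the
-- one-row list, where A returns that row as its own group but B's indexing raises IndexError.
def Pre_game_lists_py (pred_lists : List (List String)) : Prop :=
  ∀ row ∈ pred_lists, 3 ≤ row.length
instance (pred_lists : List (List String)) : Decidable (Pre_game_lists_py pred_lists) := by
  unfold Pre_game_lists_py; infer_instance
def pvWitness_game_lists_py : List (List String) :=
  [["d", "h", "a", "x"], ["d", "h", "a", "y"], ["e", "h", "a"]]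
def Spec_game_lists_py (pred_lists : List (List String)) (out : List (List (List String))) : Prop := out = game_lists_py_alt pred_lists
instance (pred_lists : List (List String)) (out : List (List (List String))) : Decidable (Spec_game_lists_py pred_lists out) := by unfold Spec_game_lists_py; infer_instance

-- ===== CLAIM (what is proved, stated in full; the proofs are below) =====
def Claim_equal_game_lists_py : Prop := ∀ (pred_lists : List (List String)), Dom_game_lists_py pred_lists → Pre_game_lists_py pred_lists → Spec_game_lists_py pred_lists (game_lists_py pred_lists)

-- ===== LEMMAS AND PROOFS =====

-- the key A compares against: the (date, home, away) triple of a group's first row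
def hkey (g : List (List String)) : Option String × Option String × Option String :=
  gameKey ((PySem.List.pyGet? g 0).getD [])

-- A's distinct keys in first-seen order / the filtered group per key
def keysOf (p : List (List String)) : List (Option String × Option String × Option String) :=
  p.foldl gameKeysStep []

def grp (p : List (List String)) (k : Option String × Option String × Option String) :
    List (List String) :=
  p.filter (fun row => gameKey row == k)

def groupsOf (p : List (List String)) : List (List (List String)) :=
  (keysOf p).map (grp p)

-- ---- A-side characterisation ----

lemma gameMatchStep_eq (row : List String) (st : List (List (List String)) × Bool)
    (g : List (List String)) :
    gameMatchStep row st g =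
      if hkey g = gameKey row ∧ st.2 = false then (st.1 ++ [g ++ [row]], true)
      else (st.1 ++ [g], st.2) := by
  rcases st with ⟨out, b⟩
  simp only [gameMatchStep, hkey, gameKey, Prod.mk.injEq]
  cases b <;> by_cases h0 : PySem.List.pyGet? row 0 = PySem.List.pyGet? ((PySem.List.pyGet? g 0).getD []) 0 <;>
    by_cases h1 : PySem.List.pyGet? row 1 = PySem.List.pyGet? ((PySem.List.pyGet? g 0).getD []) 1 <;>
    by_cases h2 : PySem.List.pyGet? row 2 = PySem.List.pyGet? ((PySem.List.pyGet? g 0).getD []) 2 <;>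
    simp only [h0, h1, h2, beq_iff_eq, beq_self_eq_true, Bool.true_and, Bool.and_true,
      Bool.not_true, Bool.not_false] <;>
    simp_all [Prod.ext_iff] <;> tauto

lemma foldl_match_true (row : List String) :
    ∀ (gls : List (List (List String))) (pre : List (List (List String))),
      gls.foldl (gameMatchStep row) (pre, true) = (pre ++ gls, true) := by
  intro gls
  induction gls with
  | nil => intro pre; simp
  | cons g t ih =>
      intro pre
      rw [List.foldl_cons, gameMatchStep_eq, if_neg (by simp)]
      rw [ih]
      simp

lemma foldl_match_none (row : List String) :
    ∀ (gls : List (List (List String))) (pre : List (List (List String))),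
      (∀ g ∈ gls, hkey g ≠ gameKey row) →
      gls.foldl (gameMatchStep row) (pre, false) = (pre ++ gls, false) := by
  intro gls
  induction gls with
  | nil => intro pre _; simp
  | cons g t ih =>
      intro pre h
      rw [List.foldl_cons, gameMatchStep_eq]
      rw [if_neg (by simp [h g (List.mem_cons_self)])]
      rw [ih _ (fun x hx => h x (List.mem_cons_of_mem _ hx))]
      simp

lemma foldl_match_found (row : List String) (l : List (List (List String)))
    (g : List (List String)) (r : List (List (List String)))
    (hl : ∀ x ∈ l, hkey x ≠ gameKey row) (hg : hkey g = gameKey row) :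
    (l ++ g :: r).foldl (gameMatchStep row) ([], false)
      = (l ++ (g ++ [row]) :: r, true) := by
  rw [List.foldl_append, foldl_match_none row l [] hl]
  rw [List.foldl_cons, gameMatchStep_eq, if_pos ⟨hg, rfl⟩]
  rw [foldl_match_true]
  simp

lemma outer_not_mem (row : List String) (gls : List (List (List String)))
    (h : ∀ g ∈ gls, hkey g ≠ gameKey row) : gameOuterStep gls row = gls ++ [[row]] := by
  unfold gameOuterStep
  rw [foldl_match_none row gls [] h]
  simp

lemma outer_found (row : List String) (l : List (List (List String)))
    (g : List (List String)) (r : List (List (List String)))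
    (hl : ∀ x ∈ l, hkey x ≠ gameKey row) (hg : hkey g = gameKey row) :
    gameOuterStep (l ++ g :: r) row = l ++ (g ++ [row]) :: r := by
  unfold gameOuterStep
  rw [foldl_match_found row l g r hl hg]
  simp

-- ---- B-side characterisation ----

lemma hkey_cons (a : List String) (t : List (List String)) : hkey (a :: t) = gameKey a := by
  simp [hkey]

lemma mem_gameKeysStep (k : Option String × Option String × Option String)
    (ks : List (Option String × Option String × Option String)) (row : List String) :
    k ∈ gameKeysStep ks row ↔ k ∈ ks ∨ gameKey row = k := by
  unfold gameKeysStep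
  split_ifs with h
  · constructor
    · exact Or.inl
    · rintro (hk | rfl) <;> [exact hk; exact h]
  · simp [or_comm, eq_comm]

lemma mem_foldl_keysStep (k : Option String × Option String × Option String) :
    ∀ (p : List (List String)) (ks : List (Option String × Option String × Option String)),
      k ∈ p.foldl gameKeysStep ks ↔ k ∈ ks ∨ ∃ row ∈ p, gameKey row = k := by
  intro p
  induction p with
  | nil => intro ks; simp
  | cons row t ih =>
      intro ks
      rw [List.foldl_cons, ih, mem_gameKeysStep]
      simp only [List.mem_cons]
      constructor
      · rintro (⟨hk | hk⟩ | ⟨r, hr, hkr⟩)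
        · exact Or.inl hk
        · exact Or.inr ⟨row, Or.inl rfl, hk⟩
        · exact Or.inr ⟨r, Or.inr hr, hkr⟩
      · rintro (hk | ⟨r, (rfl | hr), hkr⟩)
        · exact Or.inl (Or.inl hk)
        · exact Or.inl (Or.inr hkr)
        · exact Or.inr ⟨r, hr, hkr⟩

lemma mem_keysOf (k : Option String × Option String × Option String) (p : List (List String)) :
    k ∈ keysOf p ↔ ∃ row ∈ p, gameKey row = k := by
  rw [keysOf, mem_foldl_keysStep]
  simp

lemma nodup_foldl_keysStep :
    ∀ (p : List (List String)) (ks : List (Option String × Option String × Option String)),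
      ks.Nodup → (p.foldl gameKeysStep ks).Nodup := by
  intro p
  induction p with
  | nil => intro ks h; simpa
  | cons row t ih =>
      intro ks h
      rw [List.foldl_cons]
      apply ih
      unfold gameKeysStep
      split_ifs with hm
      · exact h
      · rw [List.nodup_append]
        refine ⟨h, List.nodup_singleton _, ?_⟩
        intro a ha b hb
        simp only [List.mem_singleton] at hb
        exact fun e => hm ((e.trans hb) ▸ ha)

lemma nodup_keysOf (p : List (List String)) : (keysOf p).Nodup :=
  nodup_foldl_keysStep p [] List.nodup_nil

lemma keysOf_append (p : List (List String)) (row : List String) :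
    keysOf (p ++ [row]) = gameKeysStep (keysOf p) row := by
  simp [keysOf, List.foldl_append]

lemma grp_append (p : List (List String)) (row : List String)
    (k : Option String × Option String × Option String) :
    grp (p ++ [row]) k = grp p k ++ (if gameKey row = k then [row] else []) := by
  simp only [grp, List.filter_append, List.filter_cons, List.filter_nil]
  split_ifs with h <;> simp_all

lemma grp_ne_nil (p : List (List String)) (k : Option String × Option String × Option String)
    (hk : k ∈ keysOf p) : grp p k ≠ [] := by
  obtain ⟨row, hr, rfl⟩ := (mem_keysOf _ _).mp hk
  intro h
  have : row ∈ grp p (gameKey row) := by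
    simp [grp, List.mem_filter, hr]
  rw [h] at this
  exact absurd this (List.not_mem_nil)

lemma grp_eq_nil (p : List (List String)) (k : Option String × Option String × Option String)
    (hk : k ∉ keysOf p) : grp p k = [] := by
  rw [grp, List.filter_eq_nil_iff]
  intro row hr
  simpa using fun e => hk ((mem_keysOf _ _).mpr ⟨row, hr, e⟩)

lemma hkey_grp (p : List (List String)) (k : Option String × Option String × Option String)
    (hk : k ∈ keysOf p) : hkey (grp p k) = k := by
  cases h : grp p k with
  | nil => exact absurd h (grp_ne_nil p k hk)
  | cons a t =>
      have ha : a ∈ grp p k := by rw [h]; exact List.mem_cons_self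
      rw [grp, List.mem_filter] at ha
      have : gameKey a = k := by simpa using ha.2
      rw [hkey_cons, this]

-- ---- the step: one row through A's outer loop preserves the staged-pass description ----

lemma outer_step (p : List (List String)) (row : List String) :
    gameOuterStep (groupsOf p) row = groupsOf (p ++ [row]) := by
  by_cases hmem : gameKey row ∈ keysOf p
  · -- key already seen: exactly one group (with nodup keys) matches
    obtain ⟨kl, kr, hsplit⟩ := List.append_of_mem hmem
    have hnd : (kl ++ gameKey row :: kr).Nodup := hsplit ▸ nodup_keysOf p
    have hkl : gameKey row ∉ kl := by
      intro h
      exact (List.nodup_append.mp hnd).2.2 _ h _ List.mem_cons_self rfl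
    have hkr : gameKey row ∉ kr := (List.nodup_cons.mp (List.nodup_append.mp hnd).2.1).1
    have hmemOf : ∀ k' ∈ keysOf p, hkey (grp p k') = k' := fun k' hk' => hkey_grp p k' hk'
    have hglseq : groupsOf p = kl.map (grp p) ++ grp p (gameKey row) :: kr.map (grp p) := by
      rw [groupsOf, hsplit]; simp
    have hfound : gameOuterStep (groupsOf p) row
        = kl.map (grp p) ++ (grp p (gameKey row) ++ [row]) :: kr.map (grp p) := by
      rw [hglseq]
      apply outer_found
      · rintro x hx
        obtain ⟨k', hk', rfl⟩ := List.mem_map.mp hx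
        rw [hmemOf k' (hsplit ▸ List.mem_append_left _ hk')]
        exact fun e => hkl (by rw [← e]; exact hk')
      · exact hmemOf _ hmem
    rw [hfound, groupsOf, keysOf_append, gameKeysStep, if_pos hmem, hsplit]
    simp only [List.map_append, List.map_cons]
    congr 1
    · apply List.map_congr_left
      intro k' hk'
      rw [grp_append, if_neg (fun e => hkl (by rw [e]; exact hk'))]
      simp
    · congr 1
      · rw [grp_append, if_pos rfl]
      · apply List.map_congr_left
        intro k' hk'
        rw [grp_append, if_neg (fun e => hkr (by rw [e]; exact hk'))]
        simp
  · -- new key: A appends a fresh singleton group, B a fresh key whose old filter is empty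
    have hnomatch : ∀ g ∈ groupsOf p, hkey g ≠ gameKey row := by
      intro g hg
      obtain ⟨k', hk', rfl⟩ := List.mem_map.mp hg
      rw [hkey_grp p k' hk']
      exact fun e => hmem (e ▸ hk')
    rw [outer_not_mem row _ hnomatch]
    have hrhs : groupsOf (p ++ [row]) = (gameKeysStep (keysOf p) row).map (grp (p ++ [row])) := by
      rw [groupsOf, keysOf_append]
    rw [hrhs, gameKeysStep, if_neg hmem]
    simp only [List.map_append, List.map_cons, List.map_nil]
    congr 1
    · rw [groupsOf]
      apply List.map_congr_left
      intro k' hk'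
      rw [grp_append, if_neg (fun e => hmem (by rw [e]; exact hk'))]
      simp
    · rw [grp_append, if_pos rfl, grp_eq_nil p _ hmem]
      simp

lemma loop_eq : ∀ (t p : List (List String)),
    t.foldl gameOuterStep (groupsOf p) = groupsOf (p ++ t) := by
  intro t
  induction t with
  | nil => intro p; simp
  | cons row t ih =>
      intro p
      rw [List.foldl_cons, outer_step, ih]
      simp

-- ===== VERDICT (by name: the statement is the Claim_ definition above) =====
theorem game_lists_py_spec : Claim_equal_game_lists_py := by
  intro pred_lists _ _
  unfold Spec_game_lists_py game_lists_py game_lists_py_alt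
  have h0 : ([] : List (List (List String))) = groupsOf [] := by simp [groupsOf, keysOf]
  rw [h0, loop_eq pred_lists []]
  rfl
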